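-- pv_equiv track=rewrite | github.com/vslch/google-kickstart | 2020-round-B/robot_path_decoding_solution.py | solution
-- ===== SOURCE A (Python) =====
-- MAX = 1000000000
--
-- def solution(P):
--
-- 	X = [0]
-- 	Y = [0]
-- 	C = []
-- 	m = 0
--
-- 	for c in P:
-- 		if c == "E":
-- 			X[-1] += 1
-- 		elif c == "W":
-- 			X[-1] -= 1
-- 		elif c == "N":
-- 			Y[-1] -= 1
-- 		elif c == "S":
-- 			Y[-1] += 1
-- 		elif c.isnumeric():
-- 			m = m * 10 + int(c)
-- 		elif c == "(":
-- 			C.append(m)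
-- 			X.append(0)
-- 			Y.append(0)
-- 			m = 0
-- 		elif c == ")":
-- 			c = C.pop()
-- 			x = X.pop()
-- 			y = Y.pop()
-- 			X[-1] += c * x
-- 			Y[-1] += c * y
--
-- 	x = X[-1] % MAX + 1
-- 	y = Y[-1] % MAX + 1
--
-- 	return x, y
-- ===== SOURCE B (Python) =====
-- MAX = 1000000000
--
-- def solution(P):
-- 	# Recursive-descent parser over an index; one frame per '('-group.
-- 	# The digit accumulator m is threaded through frames (a frame's leftover
-- 	# digits flow back to its caller), matching the global accumulator semantics.
-- 	def parse(i):
-- 		x = y = m = 0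
-- 		while i < len(P):
-- 			c = P[i]
-- 			if c == ")":
-- 				return x, y, m, i  # leave ')' for the caller
-- 			i += 1
-- 			if c == "E":
-- 				x += 1
-- 			elif c == "W":
-- 				x -= 1
-- 			elif c == "N":
-- 				y -= 1
-- 			elif c == "S":
-- 				y += 1
-- 			elif c.isnumeric():
-- 				m = m * 10 + int(c)
-- 			elif c == "(":
-- 				k = m
-- 				sx, sy, m, i = parse(i)
-- 				x += k * sx
-- 				y += k * sy
-- 				if i < len(P):
-- 					i += 1  # skip the ')'
-- 		return x, y, m, i
--
-- 	x, y, _, _ = parse(0)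
-- 	return x % MAX + 1, y % MAX + 1
-- ===== Notes on version B (the rewrite author's own statement) =====
-- stated objective: alternative
-- what changed: Replaces A's three parallel explicit stacks (X, Y, C) updated by index -1 with a recursive-descent parser: one recursive frame per '('-group accumulating its own (x, y) and adding count*subgroup on return; the nesting lives in the call stack instead of in lists.
-- outside the precondition, e.g. on solution('N(E'): A returns (2, 1), B returns (1, 1000000000); on solution('('): A returns (1, 1), B returns (1, 1)
import Mathlib
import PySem

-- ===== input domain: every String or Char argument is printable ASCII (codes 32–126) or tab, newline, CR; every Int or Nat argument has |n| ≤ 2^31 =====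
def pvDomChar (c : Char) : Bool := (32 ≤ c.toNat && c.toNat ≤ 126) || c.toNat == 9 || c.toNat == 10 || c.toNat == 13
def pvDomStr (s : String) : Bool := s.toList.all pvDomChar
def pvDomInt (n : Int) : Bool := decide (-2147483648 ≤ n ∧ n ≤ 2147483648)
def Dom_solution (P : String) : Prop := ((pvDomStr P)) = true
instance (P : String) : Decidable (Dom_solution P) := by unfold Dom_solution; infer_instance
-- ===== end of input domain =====

-- B replaces A's three parallel explicit stacks by a recursive-descent parser
-- (one recursive frame per '('-group); equivalence is proved on strings with
-- balanced parentheses (Pre_). Objective: alternative decomposition, same cost.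

-- ===== PORT A =====
-- stacks kept head-first: the list head is Python's last element (X[-1]).
-- bump is 'X[-1] += d'; [] is unreachable while A runs without raising.
def bumpA : List Int → Int → List Int
  | [], _ => []
  | x :: xs, d => (x + d) :: xs

def stepA (s : List Int × List Int × List Int × Int) (c : Char) :
    List Int × List Int × List Int × Int :=
  match s with
  | (X, Y, C, m) =>
    if c = 'E' then (bumpA X 1, Y, C, m)
    else if c = 'W' then (bumpA X (-1), Y, C, m)
    else if c = 'N' then (X, bumpA Y (-1), C, m)
    else if c = 'S' then (X, bumpA Y 1, C, m)
    -- c.isnumeric() = isdigit on the ASCII domain; int(c) = code - 48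
    else if PySem.Chars.isdigit c then (X, Y, C, m * 10 + ((c.toNat : Int) - 48))
    else if c = '(' then (0 :: X, 0 :: Y, m :: C, 0)
    else if c = ')' then
      match C, X, Y with
      | c0 :: C', x0 :: x1 :: X', y0 :: y1 :: Y' =>
          ((x1 + c0 * x0) :: X', (y1 + c0 * y0) :: Y', C', m)
      | _, _, _ => (X, Y, C, m)   -- Python raises here (pop from empty); outside Pre_
    else (X, Y, C, m)

def solution (P : String) : Int × Int :=
  let s := P.toList.foldl stepA ([0], [0], [], 0)
  (PySem.Int.mod (s.1.headD 0) 1000000000 + 1,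
   PySem.Int.mod (s.2.1.headD 0) 1000000000 + 1)

-- ===== PORT B =====
-- recursive-descent parser: one frame per '('-group, returning (x, y, m, rest);
-- it stops AT an unmatched ')' (rest keeps it) or at end of input.  The fuel
-- argument only makes the recursion structural; P.length fuel never runs out.
def parseB : Nat → List Char → Int → Int → Int → Int × Int × Int × List Char
  | 0, cs, x, y, m => (x, y, m, cs)
  | _ + 1, [], x, y, m => (x, y, m, [])
  | f + 1, c :: cs, x, y, m =>
    if c = ')' then (x, y, m, c :: cs)          -- return, leaving ')' for the caller
    else if c = 'E' then parseB f cs (x + 1) y m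
    else if c = 'W' then parseB f cs (x - 1) y m
    else if c = 'N' then parseB f cs x (y - 1) m
    else if c = 'S' then parseB f cs x (y + 1) m
    else if PySem.Chars.isdigit c then parseB f cs x y (m * 10 + ((c.toNat : Int) - 48))
    else if c = '(' then
      match parseB f cs 0 0 0 with
      | (sx, sy, m', rest) =>
        match rest with
        | ')' :: t => parseB f t (x + m * sx) (y + m * sy) m'   -- skip the ')'
        | t => parseB f t (x + m * sx) (y + m * sy) m'          -- end of input
    else parseB f cs x y m

def solution_alt (P : String) : Int × Int :=
  let r := parseB P.toList.length P.toList 0 0 0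
  (PySem.Int.mod r.1 1000000000 + 1, PySem.Int.mod r.2.1 1000000000 + 1)

-- ===== PRECONDITION & SPEC =====
-- goD cs d scans cs keeping the parenthesis depth starting from d:
-- none = some ')' closes below depth 0; some e = final depth e.
def goD : List Char → Nat → Option Nat
  | [], d => some d
  | c :: cs, d =>
    if c = '(' then goD cs (d + 1)
    else if c = ')' then
      match d with
      | 0 => none
      | e + 1 => goD cs e
    else goD cs d

-- Pre_ excludes strings whose parentheses are unbalanced: on an excess ')' A
-- raises IndexError, and on an unmatched '(' the input is malformed and A's
-- value (the displacement of the innermost unclosed group only) and B's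
-- (treating end-of-input as closing the group) are both accidental choices.
def Pre_solution (P : String) : Prop := goD P.toList 0 = some 0
instance (P : String) : Decidable (Pre_solution P) := by unfold Pre_solution; infer_instance

def pvWitness_solution : String := "2(NE)W"

def Spec_solution (P : String) (out : Int × Int) : Prop := out = solution_alt P
instance (P : String) (out : Int × Int) : Decidable (Spec_solution P out) := by unfold Spec_solution; infer_instance

-- ===== CLAIM (what is proved, stated in full; the proofs are below) =====
def Claim_equal_solution : Prop := ∀ (P : String), Dom_solution P → Pre_solution P → Spec_solution P (solution P)

-- ===== LEMMAS AND PROOFS =====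

theorem parseB_nil (f : Nat) (x y m : Int) : parseB f [] x y m = (x, y, m, []) := by
  cases f <;> simp [parseB]

theorem parseB_rest_len : ∀ (f : Nat) (cs : List Char) (x y m : Int),
    (parseB f cs x y m).2.2.2.length ≤ cs.length := by
  intro f
  induction f with
  | zero => intro cs x y m; simp [parseB]
  | succ f ih =>
    intro cs x y m
    match cs with
    | [] => simp [parseB]
    | c :: l =>
      simp only [parseB]
      split_ifs with h1 h2 h3 h4 h5 h6 h7
      · simp
      · exact le_trans (ih _ _ _ _) (by simp)
      · exact le_trans (ih _ _ _ _) (by simp)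
      · exact le_trans (ih _ _ _ _) (by simp)
      · exact le_trans (ih _ _ _ _) (by simp)
      · exact le_trans (ih _ _ _ _) (by simp)
      · rcases hr : parseB f l 0 0 0 with ⟨sx, sy, m', rest⟩
        have hrl : rest.length ≤ l.length := by
          have := ih l 0 0 0; rw [hr] at this; simpa using this
        cases rest with
        | nil => exact le_trans (ih _ _ _ _) (by simp)
        | cons c' t =>
          by_cases hc' : c' = ')'
          · subst hc'
            exact le_trans (ih _ _ _ _) (by simp at hrl ⊢; omega)
          · have : (match c' :: t with
                | ')' :: t => parseB f t (x + m * sx) (y + m * sy) m'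
                | t => parseB f t (x + m * sx) (y + m * sy) m') =
                parseB f (c' :: t) (x + m * sx) (y + m * sy) m' := by
              cases c'; simp_all [Char.ext_iff]
            rw [this]
            exact le_trans (ih _ _ _ _) (by simp at hrl ⊢; omega)
      · exact le_trans (ih _ _ _ _) (by simp)

theorem parseB_fuel : ∀ (n : Nat) (cs : List Char), cs.length ≤ n →
    ∀ (f1 f2 : Nat) (x y m : Int), cs.length ≤ f1 → cs.length ≤ f2 →
    parseB f1 cs x y m = parseB f2 cs x y m := by
  intro n
  induction n with
  | zero =>
    intro cs h f1 f2 x y m _ _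
    have : cs = [] := by cases cs <;> simp_all
    subst this; rw [parseB_nil, parseB_nil]
  | succ n ih =>
    intro cs hn f1 f2 x y m h1 h2
    match cs with
    | [] => rw [parseB_nil, parseB_nil]
    | c :: l =>
      obtain ⟨g1, rfl⟩ : ∃ g, f1 = g + 1 := ⟨f1 - 1, by simp at h1; omega⟩
      obtain ⟨g2, rfl⟩ : ∃ g, f2 = g + 1 := ⟨f2 - 1, by simp at h2; omega⟩
      have hl : l.length ≤ n := by simp at hn; omega
      have hg1 : l.length ≤ g1 := by simp at h1; omega
      have hg2 : l.length ≤ g2 := by simp at h2; omega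
      simp only [parseB]
      split_ifs
      · rfl
      · exact ih l hl g1 g2 _ _ _ hg1 hg2
      · exact ih l hl g1 g2 _ _ _ hg1 hg2
      · exact ih l hl g1 g2 _ _ _ hg1 hg2
      · exact ih l hl g1 g2 _ _ _ hg1 hg2
      · exact ih l hl g1 g2 _ _ _ hg1 hg2
      · rw [ih l hl g1 g2 0 0 0 hg1 hg2]
        rcases hr : parseB g2 l 0 0 0 with ⟨sx, sy, m', rest⟩
        have hrl : rest.length ≤ l.length := by
          have := parseB_rest_len g2 l 0 0 0; rw [hr] at this; simpa using this
        cases rest with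
        | nil => exact ih [] (by simp) g1 g2 _ _ _ (by simp) (by simp)
        | cons c' t =>
          by_cases hc' : c' = ')'
          · subst hc'
            simp only []
            exact ih t (by simp at hrl; omega) g1 g2 _ _ _ (by simp at hrl; omega) (by simp at hrl; omega)
          · have hred : ∀ (g : Nat) (a b cc : Int), (match c' :: t with
                | ')' :: u => parseB g u a b cc
                | u => parseB g u a b cc) = parseB g (c' :: t) a b cc := by
              intro g a b cc; cases c'; simp_all [Char.ext_iff]
            rw [hred, hred]
            exact ih (c' :: t) (by omega) g1 g2 _ _ _ (by omega) (by omega)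
      · exact ih l hl g1 g2 _ _ _ hg1 hg2

theorem goD_append (u v : List Char) (d : Nat) :
    goD (u ++ v) d = (goD u d).bind (fun e => goD v e) := by
  induction u generalizing d with
  | nil => simp [goD]
  | cons c u ih =>
    simp only [List.cons_append, goD]
    split_ifs with h1 h2
    · exact ih _
    · cases d with
      | zero => simp
      | succ e => exact ih _
    · exact ih _

theorem goD_shift (cs : List Char) : ∀ (d e k : Nat), goD cs d = some e →
    goD cs (d + k) = some (e + k) := by
  induction cs with
  | nil => intro d e k h; simp [goD] at h ⊢; omega
  | cons c l ih =>
    intro d e k h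
    simp only [goD] at h ⊢
    split_ifs at h ⊢ with h1 h2
    · have := ih (d + 1) e k h
      rwa [Nat.add_right_comm] at this
    · cases d with
      | zero => exact absurd h (by simp)
      | succ d' =>
        rw [Nat.succ_add]
        exact ih d' e k h
    · exact ih d e k h

theorem goD_fact : ∀ (n : Nat) (cs : List Char), cs.length ≤ n → ∀ (d : Nat),
    goD cs (d + 1) = some 0 →
    ∃ a b, cs = a ++ ')' :: b ∧ goD a 0 = some 0 ∧ goD b d = some 0 := by
  intro n
  induction n with
  | zero =>
    intro cs h d hg
    have : cs = [] := by cases cs <;> simp_all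
    subst this; simp [goD] at hg
  | succ n ih =>
    intro cs hlen d hg
    match cs with
    | [] => simp [goD] at hg
    | c :: l =>
      have hl : l.length ≤ n := by simp at hlen; omega
      by_cases hp : c = '('
      · subst hp
        rw [show goD ('(' :: l) (d + 1) = goD l (d + 2) from by simp [goD]] at hg
        obtain ⟨a1, b1, rfl, ha1, hb1⟩ := ih l hl (d + 1) hg
        obtain ⟨a2, b2, rfl, ha2, hb2⟩ :=
          ih b1 (by simp at hl; omega) d hb1
        refine ⟨'(' :: a1 ++ ')' :: a2, b2, by simp, ?_, hb2⟩
        have h1 : goD a1 1 = some 1 := goD_shift a1 0 0 1 ha1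
        rw [show goD ('(' :: a1 ++ ')' :: a2) 0 = goD (a1 ++ ')' :: a2) 1 from by simp [goD]]
        rw [goD_append, h1]
        simpa [goD] using ha2
      · by_cases hr : c = ')'
        · subst hr
          rw [show goD (')' :: l) (d + 1) = goD l d from by simp [goD]] at hg
          exact ⟨[], l, rfl, by simp [goD], hg⟩
        · rw [show goD (c :: l) (d + 1) = goD l (d + 1) from by simp [goD, hp, hr]] at hg
          obtain ⟨a, b, rfl, ha, hb⟩ := ih l hl d hg
          exact ⟨c :: a, b, by simp, by simp [goD, hp, hr, ha], hb⟩

theorem step_agree (c : Char) (hp : c ≠ '(') (hr : c ≠ ')') (x y m : Int) :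
    ∃ x1 y1 m1 : Int,
      (∀ (X Y C : List Int), stepA (x :: X, y :: Y, C, m) c = (x1 :: X, y1 :: Y, C, m1)) ∧
      (∀ (g : Nat) (lt : List Char), parseB (g + 1) (c :: lt) x y m = parseB g lt x1 y1 m1) := by
  by_cases hE : c = 'E'
  · exact ⟨x + 1, y, m, fun X Y C => by simp [stepA, hE, bumpA],
      fun g lt => by simp [parseB, hE]⟩
  · by_cases hW : c = 'W'
    · exact ⟨x - 1, y, m, fun X Y C => by
        simp [stepA, hW, bumpA]; ring, fun g lt => by simp [parseB, hW]⟩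
    · by_cases hN : c = 'N'
      · exact ⟨x, y - 1, m, fun X Y C => by
          simp [stepA, hN, bumpA]; ring, fun g lt => by simp [parseB, hN]⟩
      · by_cases hS : c = 'S'
        · exact ⟨x, y + 1, m, fun X Y C => by simp [stepA, hS, bumpA],
            fun g lt => by simp [parseB, hS]⟩
        · by_cases hD : PySem.Chars.isdigit c = true
          · refine ⟨x, y, m * 10 + ((c.toNat : Int) - 48), fun X Y C => by
              simp [stepA, hE, hW, hN, hS, hD], fun g lt => by
              simp [parseB, hE, hW, hN, hS, hD, hr]⟩
          · refine ⟨x, y, m, fun X Y C => by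
              simp [stepA, hE, hW, hN, hS, hD, hp, hr], fun g lt => by
              simp [parseB, hE, hW, hN, hS, hD, hp, hr]⟩

theorem main_equiv : ∀ (n : Nat) (cs : List Char), cs.length ≤ n → goD cs 0 = some 0 →
    ∀ (x y m : Int) (t : List Char),
    ∃ x' y' m' : Int,
      (∀ fuel : Nat, cs.length + t.length ≤ fuel →
        parseB fuel (cs ++ t) x y m = parseB t.length t x' y' m') ∧
      (∀ (X Y C : List Int),
        List.foldl stepA (x :: X, y :: Y, C, m) cs = (x' :: X, y' :: Y, C, m')) := by
  intro n
  induction n with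
  | zero =>
    intro cs h hg x y m t
    have : cs = [] := by cases cs <;> simp_all
    subst this
    exact ⟨x, y, m, fun fuel hf => by
      simpa using parseB_fuel t.length t le_rfl fuel t.length x y m (by simpa using hf) le_rfl,
      fun X Y C => by simp⟩
  | succ n ih =>
    intro cs hn hg x y m t
    match cs with
    | [] =>
      exact ⟨x, y, m, fun fuel hf => by
        simpa using parseB_fuel t.length t le_rfl fuel t.length x y m (by simpa using hf) le_rfl,
        fun X Y C => by simp⟩
    | c :: l =>
      have hl : l.length ≤ n := by simp at hn; omega
      by_cases hr : c = ')'
      · subst hr; simp [goD] at hg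
      · by_cases hp : c = '('
        · subst hp
          rw [show goD ('(' :: l) 0 = goD l 1 from by simp [goD]] at hg
          obtain ⟨a, b, rfl, ha, hb⟩ := goD_fact l.length l le_rfl 0 hg
          simp only [List.length_append, List.length_cons] at hl
          obtain ⟨xa, ya, ma, hPa, hFa⟩ :=
            ih a (by omega) ha 0 0 0 (')' :: (b ++ t))
          obtain ⟨x', y', m', hPb, hFb⟩ :=
            ih b (by omega) hb (x + m * xa) (y + m * ya) ma t
          refine ⟨x', y', m', ?_, ?_⟩
          · intro fuel hf
            obtain ⟨g, rfl⟩ : ∃ g, fuel = g + 1 := ⟨fuel - 1, by simp at hf; omega⟩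
            have e1 : (('(' : Char) :: (a ++ ')' :: b)) ++ t = '(' :: (a ++ ')' :: (b ++ t)) := by
              simp
            rw [e1]
            have hinner := hPa g (by simp at hf ⊢; omega)
            rw [show (')' :: (b ++ t)).length = (b ++ t).length + 1 from rfl] at hinner
            rw [show parseB ((b ++ t).length + 1) (')' :: (b ++ t)) xa ya ma =
                (xa, ya, ma, ')' :: (b ++ t)) from by simp [parseB]] at hinner
            simp only [parseB,
              show (('(' : Char) = ')') = False from by decide,
              show (('(' : Char) = 'E') = False from by decide,
              show (('(' : Char) = 'W') = False from by decide,
              show (('(' : Char) = 'N') = False from by decide,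
              show (('(' : Char) = 'S') = False from by decide,
              show PySem.Chars.isdigit '(' = false from by decide,
              if_false, if_pos rfl, Bool.false_eq_true, if_neg (fun h => h)]
            rw [hinner]
            exact hPb g (by simp at hf ⊢; omega)
          · intro X Y C
            have hstep : stepA (x :: X, y :: Y, C, m) '(' = (0 :: x :: X, 0 :: y :: Y, m :: C, 0) := by
              simp [stepA, show PySem.Chars.isdigit '(' = false from by decide]
            rw [List.foldl_cons, hstep, List.foldl_append, hFa (x :: X) (y :: Y) (m :: C)]
            have hstep2 : stepA (xa :: x :: X, ya :: y :: Y, m :: C, ma) ')' =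
                ((x + m * xa) :: X, (y + m * ya) :: Y, C, ma) := by
              simp [stepA, show PySem.Chars.isdigit ')' = false from by decide]
            rw [List.foldl_cons, hstep2]
            exact hFb X Y C
        · rw [show goD (c :: l) 0 = goD l 0 from by simp [goD, hp, hr]] at hg
          obtain ⟨x1, y1, m1, hstep, hparse⟩ := step_agree c hp hr x y m
          obtain ⟨x', y', m', hP, hF⟩ := ih l hl hg x1 y1 m1 t
          refine ⟨x', y', m', ?_, ?_⟩
          · intro fuel hf
            obtain ⟨g, rfl⟩ : ∃ g, fuel = g + 1 := ⟨fuel - 1, by simp at hf; omega⟩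
            rw [List.cons_append, hparse g (l ++ t)]
            exact hP g (by simp at hf ⊢; omega)
          · intro X Y C
            rw [List.foldl_cons, hstep X Y C]
            exact hF X Y C

-- ===== VERDICT (by name: the statement is the Claim_ definition above) =====
theorem solution_spec : Claim_equal_solution := by
  intro P _ hPre
  unfold Spec_solution solution solution_alt
  obtain ⟨x', y', m', hP, hF⟩ := main_equiv P.toList.length P.toList le_rfl hPre 0 0 0 []
  have h1 := hP P.toList.length (by simp)
  have h2 := hF [] [] []
  simp only [List.append_nil, parseB_nil] at h1
  rw [h1, h2]
  simp
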